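-- pv_equiv track=rewrite | github.com/CodelineAtyab/OrbitXO | examples/from_arooba/aiops_2025_final_evaluation/converter.py | convert_measurements
-- ===== SOURCE A (Python) =====
-- def convert_measurements(input_str: str):
--     """
--     يحول النصوص إلى أرقام حسب القواعد:
--     1. a=1, b=2, ..., z=26
--     2. '_' = 0
--     3. 'z' لا يمكن أن تكون لوحدها، لازم تاخذ الحرف اللي بعدها (حتى لو كان 'z' أو '_')
--     4. أول عنصر في كل package هو count (عدد العناصر اللي بعدها)
--     5. لو count = '_' (يعني 0) → أضف 0 مباشرة
--     6. لو string ينتهي بـ '_' وكان count → أضف 0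
--        أما لو '_' كقيمة → تحسب مع باقي القيم
--     """
--
--     # دالة لتحويل حرف/مجموعة أحرف إلى قيمة رقمية
--     def char_to_value(seq: str) -> int:
--         total = 0
--         for c in seq:
--             if c == "_":
--                 total += 0
--             else:
--                 total += ord(c) - 96  # ord('a')=97 => a=1, b=2...
--         return total
--
--     results = []
--     i = 0
--     n = len(input_str)
--
--     while i < n:
--         # --------- 1) استخراج count -----------
--         if input_str[i] == "_":
--             count = 0
--             results.append(0)
--             i += 1
--             continue
--
--         # حالة 'z' كـ count
--         if input_str[i] == "z":
--             seq = "z"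
--             j = i + 1
--             while j < n and input_str[j] == "z":
--                 seq += "z"
--                 j += 1
--             if j < n:
--                 seq += input_str[j]
--                 j += 1
--             count = char_to_value(seq)
--             i = j
--         else:
--             count = char_to_value(input_str[i])
--             i += 1
--
--         # --------- 2) استخراج value(s) -----------
--         if count == 0:
--             results.append(0)
--             continue
--
--         values = []
--         taken = 0
--         while taken < count and i < n:
--             if input_str[i] == "z":
--                 seq = "z"
--                 j = i + 1
--                 while j < n and input_str[j] == "z":
--                     seq += "z"
--                     j += 1
--                 if j < n:
--                     seq += input_str[j]
--                     j += 1
--                 values.append(char_to_value(seq))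
--                 i = j
--             else:
--                 values.append(char_to_value(input_str[i]))
--                 i += 1
--             taken += 1
--
--         results.append(sum(values))
--
--     return results
-- ===== SOURCE B (Python) =====
-- def convert_measurements(input_str: str):
--     # Two-pass: tokenize the whole string once, then group tokens into packages.
--     def v(c):
--         return 0 if c == "_" else ord(c) - 96
--
--     n = len(input_str)
--     vals = []
--     i = 0
--     while i < n:
--         if input_str[i] == "z":
--             j = i
--             while j < n and input_str[j] == "z":
--                 j += 1
--             tot = 26 * (j - i)
--             if j < n:
--                 tot += v(input_str[j])
--                 j += 1
--             vals.append(tot)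
--             i = j
--         else:
--             vals.append(v(input_str[i]))
--             i += 1
--
--     results = []
--     k = 0
--     m = len(vals)
--     while k < m:
--         count = vals[k]
--         k += 1
--         if count <= 0:
--             results.append(0)
--         else:
--             take = min(count, m - k)
--             results.append(sum(vals[k:k + take]))
--             k += take
--     return results
-- ===== Notes on version B (the rewrite author's own statement) =====
-- stated objective: alternative
-- what changed: B replaces A's single interleaved while-loop (which re-implements z-run scanning in two places and mixes count extraction with value collection) by a two-pass decomposition: one tokenizer pass producing the list of token values, then a grouping pass that takes each count token and sums the next min(count, remaining) tokens.
import Mathlib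
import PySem

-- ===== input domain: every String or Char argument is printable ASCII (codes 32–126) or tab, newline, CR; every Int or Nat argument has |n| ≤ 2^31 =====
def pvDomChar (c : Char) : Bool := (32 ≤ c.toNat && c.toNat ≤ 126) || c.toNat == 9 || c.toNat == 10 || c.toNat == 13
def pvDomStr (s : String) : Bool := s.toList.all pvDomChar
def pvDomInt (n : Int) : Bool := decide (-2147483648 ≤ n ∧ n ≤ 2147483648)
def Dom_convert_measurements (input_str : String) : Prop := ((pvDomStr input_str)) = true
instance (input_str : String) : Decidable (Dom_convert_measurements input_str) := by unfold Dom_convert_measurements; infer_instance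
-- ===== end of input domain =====

-- B is an alternative two-pass decomposition (tokenize, then group); A interleaves
-- token extraction with package grouping in one indexed while-loop. Return values proved equal.

-- ===== PORT A =====
-- char_to_value on a single non-'_' char
def charValA (c : Char) : Int := if c = '_' then 0 else (c.toNat : Int) - 96

-- A's inner z-run scan: value of the remaining z's plus the one following char (if any),
-- together with the rest of the string after them
def grabTailA : List Char → Int × List Char
  | [] => (0, [])
  | c :: rest =>
    if c = 'z' then
      let p := grabTailA rest
      (26 + p.1, p.2)
    else (charValA c, rest)

theorem grabTailA_len : ∀ l : List Char, (grabTailA l).2.length ≤ l.length := by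
  intro l
  induction l with
  | nil => simp [grabTailA]
  | cons c rest ih =>
    simp only [grabTailA]
    split <;> simp <;> try omega

-- A's value-collection loop: `while taken < count and i < n`
def loopValsA (count taken : Int) (l : List Char) (values : List Int) : List Int × List Char :=
  if taken < count then
    match l with
    | [] => (values, [])
    | c :: rest =>
      if c = 'z' then
        let p := grabTailA rest
        loopValsA count (taken + 1) p.2 (values ++ [26 + p.1])
      else loopValsA count (taken + 1) rest (values ++ [charValA c])
  else (values, l)
termination_by l.length
decreasing_by
  · have := grabTailA_len rest; simp; omega
  · simp

theorem loopValsA_len : ∀ (n : Nat) (count taken : Int) (l : List Char) (values : List Int),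
    l.length ≤ n → (loopValsA count taken l values).2.length ≤ l.length := by
  intro n
  induction n with
  | zero =>
    intro count taken l values h
    have : l = [] := by cases l <;> simp_all
    subst this
    unfold loopValsA; split <;> simp
  | succ n ih =>
    intro count taken l values h
    unfold loopValsA
    split
    · match l with
      | [] => simp
      | c :: rest =>
        simp only
        split
        · have h1 := grabTailA_len rest
          have h2 := ih count (taken + 1) (grabTailA rest).2 (values ++ [26 + (grabTailA rest).1]) (by simp at h ⊢; omega)
          simp at h2 ⊢; omega
        · have h2 := ih count (taken + 1) rest (values ++ [charValA c]) (by simp at h; omega)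
          simp; omega
    · simp

-- A's main while-loop over the string
def mainA : List Char → List Int
  | [] => []
  | c :: rest =>
    if c = '_' then 0 :: mainA rest
    else if c = 'z' then
      let p := grabTailA rest
      let count := 26 + p.1
      if count = 0 then 0 :: mainA p.2
      else
        let vr := loopValsA count 0 p.2 []
        vr.1.sum :: mainA vr.2
    else
      let count := charValA c
      if count = 0 then 0 :: mainA rest
      else
        let vr := loopValsA count 0 rest []
        vr.1.sum :: mainA vr.2
termination_by l => l.length
decreasing_by
  · simp
  · have := grabTailA_len rest; simp; omega
  · have h1 := grabTailA_len rest
    have h2 := loopValsA_len (grabTailA rest).2.length (26 + (grabTailA rest).1) 0 (grabTailA rest).2 [] le_rfl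
    simp; omega
  · simp
  · have h2 := loopValsA_len rest.length (charValA c) 0 rest [] le_rfl
    simp; omega

def convert_measurements (input_str : String) : List Int := mainA input_str.toList

-- ===== PORT B =====
def charValB (c : Char) : Int := if c = '_' then 0 else (c.toNat : Int) - 96

-- length of the leading run of 'z' and the rest
def zspanB : List Char → Nat × List Char
  | [] => (0, [])
  | c :: rest =>
    if c = 'z' then
      let p := zspanB rest
      (p.1 + 1, p.2)
    else (0, c :: rest)

theorem zspanB_len : ∀ l : List Char, (zspanB l).2.length ≤ l.length := by
  intro l
  induction l with
  | nil => simp [zspanB]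
  | cons c rest ih =>
    simp only [zspanB]
    split <;> simp <;> try omega

-- pass 1: token values
def tokenizeB : List Char → List Int
  | [] => []
  | c :: rest =>
    if c = 'z' then
      let p := zspanB (c :: rest)
      match hr : p.2 with
      | [] => [26 * (p.1 : Int)]
      | d :: r' => (26 * (p.1 : Int) + charValB d) :: tokenizeB r'
    else charValB c :: tokenizeB rest
termination_by l => l.length
decreasing_by
  · have := zspanB_len (c :: rest)
    rw [hr] at this; simp at this ⊢; omega
  · simp

-- pass 2: group tokens into packages
def packsB : List Int → List Int
  | [] => []
  | c :: rest =>
    if c ≤ 0 then 0 :: packsB rest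
    else
      let t := min c.toNat rest.length
      (rest.take t).sum :: packsB (rest.drop t)
termination_by l => l.length
decreasing_by
  · simp
  · simp; try omega

def convert_measurements_alt (input_str : String) : List Int := packsB (tokenizeB input_str.toList)

-- ===== PRECONDITION & SPEC =====
def Spec_convert_measurements (input_str : String) (out : List Int) : Prop := out = convert_measurements_alt input_str
instance (input_str : String) (out : List Int) : Decidable (Spec_convert_measurements input_str out) := by unfold Spec_convert_measurements; infer_instance

-- ===== CLAIM (what is proved, stated in full; the proofs are below) =====
def Claim_equal_convert_measurements : Prop := ∀ (input_str : String), Dom_convert_measurements input_str → Spec_convert_measurements input_str (convert_measurements input_str)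

-- ===== LEMMAS AND PROOFS =====

theorem charVal_eq : ∀ c, charValA c = charValB c := fun _ => rfl

-- zspanB on a string starting with 'z'
theorem zspanB_z (l : List Char) : zspanB ('z' :: l) = ((zspanB l).1 + 1, (zspanB l).2) := by
  simp [zspanB]

-- grabTailA in terms of zspanB
theorem grabTail_zspan : ∀ l : List Char,
    grabTailA l = (26 * ((zspanB l).1 : Int) +
        (match (zspanB l).2 with | [] => 0 | d :: _ => charValA d),
      match (zspanB l).2 with | [] => ([] : List Char) | _ :: r' => r') := by
  intro l
  induction l with
  | nil => simp [grabTailA, zspanB]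
  | cons c rest ih =>
    by_cases hc : c = 'z'
    · subst hc
      rcases h2 : (zspanB rest).2 with _ | ⟨d, r'⟩ <;>
        simp [grabTailA, zspanB, ih, h2] <;> push_cast <;> ring
    · simp [grabTailA, zspanB, hc]

-- the z-token lemma: tokenizing a string starting with 'z' yields A's z-run token
theorem tokenizeB_z (rest : List Char) :
    tokenizeB ('z' :: rest) =
      (26 + (grabTailA rest).1) :: tokenizeB (grabTailA rest).2 := by
  rw [grabTail_zspan rest]
  unfold tokenizeB
  simp only [reduceIte, zspanB_z]
  split
  · next hr =>
    rw [zspanB_z] at hr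
    simp only at hr
    simp [hr, charVal_eq]
    push_cast; ring
  · next d r' hr =>
    rw [zspanB_z] at hr
    simp only at hr
    simp [hr, charVal_eq]
    exact ⟨by push_cast; ring, by rw [← tokenizeB.eq_def]⟩

-- the non-z token lemma
theorem tokenizeB_nz (c : Char) (rest : List Char) (h : c ≠ 'z') :
    tokenizeB (c :: rest) = charValA c :: tokenizeB rest := by
  simp [tokenizeB, h, charVal_eq]

-- A's value loop computes take/drop on the token list
theorem loopValsA_spec : ∀ (n : Nat) (l : List Char) (count taken : Int) (values : List Int),
    l.length ≤ n →
    (loopValsA count taken l values).1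
        = values ++ (tokenizeB l).take (min (count - taken).toNat (tokenizeB l).length)
    ∧ tokenizeB (loopValsA count taken l values).2
        = (tokenizeB l).drop (min (count - taken).toNat (tokenizeB l).length) := by
  intro n
  induction n with
  | zero =>
    intro l count taken values h
    have hl : l = [] := by cases l <;> simp_all
    subst hl
    unfold loopValsA; split <;> simp [tokenizeB]
  | succ n ih =>
    intro l count taken values h
    by_cases hlt : taken < count
    · match l with
      | [] =>
        unfold loopValsA; rw [if_pos hlt]; simp [tokenizeB]
      | c :: rest =>
        by_cases hc : c = 'z'
        · subst hc
          have hlen : (grabTailA rest).2.length ≤ n := by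
            have := grabTailA_len rest; simp at h; omega
          have H := ih (grabTailA rest).2 count (taken + 1) (values ++ [26 + (grabTailA rest).1]) hlen
          unfold loopValsA
          rw [if_pos hlt]
          simp only [reduceIte]
          rw [tokenizeB_z rest]
          obtain ⟨H1, H2⟩ := H
          have hm : min (count - taken).toNat ((26 + (grabTailA rest).1) :: tokenizeB (grabTailA rest).2).length
              = (min (count - (taken + 1)).toNat (tokenizeB (grabTailA rest).2).length) + 1 := by
            simp; omega
          rw [hm]
          constructor
          · rw [H1]; simp
          · rw [H2]; simp
        · have H := ih rest count (taken + 1) (values ++ [charValA c]) (by simp at h; omega)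
          unfold loopValsA
          rw [if_pos hlt]
          simp only [if_neg hc]
          rw [tokenizeB_nz c rest hc]
          obtain ⟨H1, H2⟩ := H
          have hm : min (count - taken).toNat (charValA c :: tokenizeB rest).length
              = (min (count - (taken + 1)).toNat (tokenizeB rest).length) + 1 := by
            simp; omega
          rw [hm]
          constructor
          · rw [H1]; simp
          · rw [H2]; simp
    · unfold loopValsA
      rw [if_neg hlt]
      have : (count - taken).toNat = 0 := by omega
      simp [this]

-- the shared step: after extracting a count token, both sides produce the same package
theorem step_eq (count : Int) (r : List Char)
    (IH : ∀ l' : List Char, l'.length ≤ r.length → mainA l' = packsB (tokenizeB l'))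
    : (if count = 0 then 0 :: mainA r
       else (loopValsA count 0 r []).1.sum :: mainA (loopValsA count 0 r []).2)
      = packsB (count :: tokenizeB r) := by
  obtain ⟨H1, H2⟩ := loopValsA_spec r.length r count 0 [] le_rfl
  have hlen2 := loopValsA_len r.length count 0 r [] le_rfl
  by_cases hc : count ≤ 0
  · have hz : (count - 0).toNat = 0 := by omega
    rw [hz] at H1 H2
    simp at H1 H2
    by_cases h0 : count = 0
    · simp only [if_pos h0, packsB, if_pos hc]
      rw [IH r le_rfl]
    · rw [if_neg h0]
      simp only [packsB, if_pos hc]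
      rw [H1, IH (loopValsA count 0 r []).2 hlen2, H2]
      simp
  · have h0 : ¬ count = 0 := by omega
    rw [if_neg h0]
    simp only [packsB, if_neg hc]
    rw [H1, IH (loopValsA count 0 r []).2 hlen2, H2]
    have : (count - 0).toNat = count.toNat := by omega
    rw [this]
    simp

theorem mainA_eq : ∀ (n : Nat) (l : List Char), l.length ≤ n → mainA l = packsB (tokenizeB l) := by
  intro n
  induction n with
  | zero =>
    intro l h
    have : l = [] := by cases l <;> simp_all
    subst this; simp [mainA, tokenizeB, packsB]
  | succ n ih =>
    intro l h
    match l with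
    | [] => simp [mainA, tokenizeB, packsB]
    | c :: rest =>
      simp at h
      by_cases hu : c = '_'
      · subst hu
        rw [mainA]
        rw [if_pos rfl, tokenizeB_nz '_' rest (by decide)]
        have : charValA '_' = 0 := by decide
        rw [this]
        simp only [packsB, if_pos (le_refl (0:Int))]
        rw [ih rest (by omega)]
      · by_cases hz : c = 'z'
        · subst hz
          rw [mainA]
          rw [if_neg hu, if_pos rfl, tokenizeB_z rest]
          have hlen : (grabTailA rest).2.length ≤ rest.length := grabTailA_len rest
          exact step_eq (26 + (grabTailA rest).1) (grabTailA rest).2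
            (fun l' hl' => ih l' (by omega))
        · rw [mainA]
          rw [if_neg hu, if_neg hz, tokenizeB_nz c rest hz]
          exact step_eq (charValA c) rest (fun l' hl' => ih l' (by omega))

-- ===== VERDICT (by name: the statement is the Claim_ definition above) =====
theorem convert_measurements_spec : Claim_equal_convert_measurements := by
  intro s _
  unfold Spec_convert_measurements convert_measurements convert_measurements_alt
  exact mainA_eq s.toList.length s.toList le_rfl
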